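-- pv_equiv track=rewrite | github.com/danagle/advent-of-code | 2015/01/solution.py | part_one
-- ===== SOURCE A (Python) =====
-- def part_one(data):
--     level = 0
--     for char in data:
--         match char:
--             case "(":
--                 level += 1
--             case ")":
--                 level -= 1
--     return level
-- ===== SOURCE B (Python) =====
-- def part_one(data):
--     return data.count("(") - data.count(")")
-- ===== Notes on version B (the rewrite author's own statement) =====
-- stated objective: simpler
-- what changed: Replaces the explicit character loop with running accumulator and match branches by a closed-form difference of two str.count scans.
import Mathlib
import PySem

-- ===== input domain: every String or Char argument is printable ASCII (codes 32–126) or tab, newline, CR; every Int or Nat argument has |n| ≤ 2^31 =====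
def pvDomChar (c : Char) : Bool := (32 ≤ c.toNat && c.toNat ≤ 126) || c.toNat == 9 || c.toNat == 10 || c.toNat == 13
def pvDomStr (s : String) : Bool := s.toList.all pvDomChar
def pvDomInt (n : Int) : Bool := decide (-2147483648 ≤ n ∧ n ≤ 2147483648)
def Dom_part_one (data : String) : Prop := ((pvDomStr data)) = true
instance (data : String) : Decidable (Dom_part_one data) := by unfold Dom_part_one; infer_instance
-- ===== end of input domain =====

-- B computes the level as a closed-form difference of two str.count scans instead of A's
-- single accumulator loop with match branches.

-- ===== PORT A =====
def part_one (data : String) : Int :=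
  data.toList.foldl (fun level char =>
    if char = '(' then level + 1
    else if char = ')' then level - 1
    else level) 0

-- ===== PORT B =====
def part_one_alt (data : String) : Int :=
  (PySem.Str.count data "(" : Int) - (PySem.Str.count data ")" : Int)

-- ===== PRECONDITION & SPEC =====
def Spec_part_one (data : String) (out : Int) : Prop := out = part_one_alt data
instance (data : String) (out : Int) : Decidable (Spec_part_one data out) := by unfold Spec_part_one; infer_instance

-- ===== CLAIM (what is proved, stated in full; the proofs are below) =====
def Claim_equal_part_one : Prop := ∀ (data : String), Dom_part_one data → Spec_part_one data (part_one data)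

-- ===== LEMMAS AND PROOFS =====

-- Chars.count with a single-character needle equals List.count of that character.
theorem chars_count_go_singleton (c : Char) (l : List Char) (fuel acc : Nat)
    (h : l.length ≤ fuel) :
    PySem.Chars.count.go [c] fuel l acc = acc + l.count c := by
  induction l generalizing fuel acc with
  | nil => cases fuel <;> simp [PySem.Chars.count.go]
  | cons x t ih =>
    cases fuel with
    | zero => simp at h
    | succ n =>
      simp only [List.length_cons, Nat.succ_le_succ_iff] at h
      by_cases hx : x = c
      · subst hx
        simp [PySem.Chars.count.go, List.isPrefixOf, ih _ _ h]
        omega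
      · have hp : List.isPrefixOf [c] (x :: t) = false := by
          simp [List.isPrefixOf]
          intro hc
          exact absurd hc.symm hx
        simp [PySem.Chars.count.go, hp, ih _ _ h, hx]

theorem chars_count_singleton (c : Char) (l : List Char) :
    PySem.Chars.count l [c] = l.count c := by
  simp [PySem.Chars.count, chars_count_go_singleton c l l.length 0 le_rfl]

theorem foldl_level (l : List Char) (a : Int) :
    l.foldl (fun level char =>
      if char = '(' then level + 1
      else if char = ')' then level - 1
      else level) a = a + (l.count '(' : Int) - (l.count ')' : Int) := by
  induction l generalizing a with
  | nil => simp
  | cons x t ih =>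
    simp only [List.foldl_cons, ih, List.count_cons]
    by_cases h1 : x = '(' <;> by_cases h2 : x = ')' <;>
      simp [h1, h2] <;> omega

-- ===== VERDICT (by name: the statement is the Claim_ definition above) =====
theorem part_one_spec : Claim_equal_part_one := by
  intro data _
  unfold Spec_part_one part_one part_one_alt
  rw [show PySem.Str.count data "(" = PySem.Chars.count data.toList "(".toList from rfl,
      show PySem.Str.count data ")" = PySem.Chars.count data.toList ")".toList from rfl]
  simp [show "(".toList = ['('] from rfl, show ")".toList = [')'] from rfl,
        chars_count_singleton, foldl_level]
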